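-- pv_equiv track=rewrite | github.com/wozdani/crypto-scan | crypto-scan/utils/gpt_label_consistency.py | _suggest_resolution
-- ===== SOURCE A (Python) =====
-- def _suggest_resolution(analysis_label: str, commentary_label: str) -> str:
--     """Suggest which label should be used for resolution"""
--
--     # Priority rules for conflict resolution
--     priority_order = [
--         "breakout_pattern",
--         "pullback_in_trend",
--         "trend_continuation",
--         "range_trading",
--         "consolidation_squeeze",
--         "reversal_pattern"
--     ]
--
--     # Check if either label is in priority list
--     for priority_label in priority_order:
--         if priority_label == analysis_label:
--             return analysis_label
--         if priority_label == commentary_label: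
--             return commentary_label
--
--     # Default: prefer commentary label (more detailed analysis)
--     return commentary_label
-- ===== SOURCE B (Python) =====
-- def _suggest_resolution(analysis_label: str, commentary_label: str) -> str:
--     """Suggest which label should be used for resolution"""
--     priority_order = [
--         "breakout_pattern",
--         "pullback_in_trend",
--         "trend_continuation",
--         "range_trading",
--         "consolidation_squeeze",
--         "reversal_pattern"
--     ]
--     rank = {label: i for i, label in enumerate(priority_order)}
--     sentinel = len(priority_order)
--     ra = rank.get(analysis_label, sentinel)
--     rb = rank.get(commentary_label, sentinel)
--     return analysis_label if ra < rb else commentary_label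
-- ===== Notes on version B (the rewrite author's own statement) =====
-- stated objective: simpler
-- what changed: Replaces the interleaved two-checks-per-iteration scan with a rank table built once: each label's priority index (sentinel = list length if absent) is looked up and the two ranks compared, returning analysis_label only when its rank is strictly smaller.
import Mathlib
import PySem

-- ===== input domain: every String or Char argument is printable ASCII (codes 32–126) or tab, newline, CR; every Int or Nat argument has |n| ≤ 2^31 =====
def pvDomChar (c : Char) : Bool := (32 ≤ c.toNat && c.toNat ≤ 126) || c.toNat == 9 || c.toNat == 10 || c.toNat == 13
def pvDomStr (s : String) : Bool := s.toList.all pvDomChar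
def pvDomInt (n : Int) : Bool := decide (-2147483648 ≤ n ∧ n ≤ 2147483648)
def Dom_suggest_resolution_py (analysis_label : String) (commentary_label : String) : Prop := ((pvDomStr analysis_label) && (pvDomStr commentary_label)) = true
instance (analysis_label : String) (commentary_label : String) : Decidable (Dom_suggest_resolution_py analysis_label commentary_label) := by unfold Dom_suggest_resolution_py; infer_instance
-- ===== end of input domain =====

-- B replaces A's interleaved per-label scan with a rank table and a single strict comparison (objective: simpler).

-- ===== PORT A =====
def pvPriorityOrder : List String :=
  ["breakout_pattern", "pullback_in_trend", "trend_continuation",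
   "range_trading", "consolidation_squeeze", "reversal_pattern"]

-- the 'for priority_label in priority_order' loop of A, with early returns
def pvALoop (ps : List String) (analysis_label commentary_label : String) : String :=
  match ps with
  | [] => commentary_label
  | p :: rest =>
    if p == analysis_label then analysis_label
    else if p == commentary_label then commentary_label
    else pvALoop rest analysis_label commentary_label

def suggest_resolution_py (analysis_label : String) (commentary_label : String) : String :=
  pvALoop pvPriorityOrder analysis_label commentary_label

-- ===== PORT B =====
def suggest_resolution_py_alt (analysis_label : String) (commentary_label : String) : String :=
  let rank : PySem.Dict String Int :=
    (PySem.List.enumerate pvPriorityOrder).foldl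
      (fun d p => d.insert p.2 p.1) PySem.Dict.empty
  let sentinel : Int := pvPriorityOrder.length
  let ra := rank.getD analysis_label sentinel
  let rb := rank.getD commentary_label sentinel
  if ra < rb then analysis_label else commentary_label

-- ===== PRECONDITION & SPEC =====
def Spec_suggest_resolution_py (analysis_label : String) (commentary_label : String) (out : String) : Prop := out = suggest_resolution_py_alt analysis_label commentary_label
instance (analysis_label : String) (commentary_label : String) (out : String) : Decidable (Spec_suggest_resolution_py analysis_label commentary_label out) := by unfold Spec_suggest_resolution_py; infer_instance

-- ===== CLAIM (what is proved, stated in full; the proofs are below) =====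
def Claim_equal_suggest_resolution_py : Prop := ∀ (analysis_label : String) (commentary_label : String), Dom_suggest_resolution_py analysis_label commentary_label → Spec_suggest_resolution_py analysis_label commentary_label (suggest_resolution_py analysis_label commentary_label)

-- ===== LEMMAS AND PROOFS =====

-- the rank dict of B evaluated to a literal
theorem rank_eval :
    ((PySem.List.enumerate pvPriorityOrder).foldl (fun d p => d.insert p.2 p.1)
      (PySem.Dict.empty : PySem.Dict String Int))
    = PySem.Dict.mk [("breakout_pattern", 0), ("pullback_in_trend", 1),
        ("trend_continuation", 2), ("range_trading", 3),
        ("consolidation_squeeze", 4), ("reversal_pattern", 5)] := rfl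

-- B's rank lookup as a plain if-chain
theorem getD_rank (x : String) :
    (PySem.Dict.mk [("breakout_pattern", (0:Int)), ("pullback_in_trend", 1),
        ("trend_continuation", 2), ("range_trading", 3),
        ("consolidation_squeeze", 4), ("reversal_pattern", 5)]).getD x (pvPriorityOrder.length : Int)
    = if "breakout_pattern" = x then 0 else if "pullback_in_trend" = x then 1
      else if "trend_continuation" = x then 2 else if "range_trading" = x then 3
      else if "consolidation_squeeze" = x then 4 else if "reversal_pattern" = x then 5
      else 6 := by
  simp only [PySem.Dict.getD, PySem.Dict.get?_mk_cons, beq_iff_eq]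
  split_ifs <;> simp_all [PySem.Dict.get?]
  decide

set_option maxHeartbeats 1000000 in
theorem suggest_resolution_eq (a c : String) :
    suggest_resolution_py a c = suggest_resolution_py_alt a c := by
  show pvALoop pvPriorityOrder a c = _
  simp only [suggest_resolution_py_alt, rank_eval]
  simp only [getD_rank]
  simp only [pvPriorityOrder, pvALoop, beq_iff_eq]
  split_ifs <;> simp_all

-- ===== VERDICT (by name: the statement is the Claim_ definition above) =====
theorem suggest_resolution_py_spec : Claim_equal_suggest_resolution_py := by
  intro a c _
  exact suggest_resolution_eq a c
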